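-- pv_equiv track=rewrite | github.com/somanshu/python-pr | dp/painting_fence.py | get_paint_count2
-- ===== SOURCE A (Python) =====
-- def get_paint_count2(n, k, av_k, isSameAsPrev):
--     if n <= 0:
--         return 1
--
--     if n == 1:
--         return av_k
--
--     res1, res2 = 0, 0
--
--     if isSameAsPrev:
--         return get_paint_count2(n-1, k, k-1, False)
--
--     res1 = av_k * get_paint_count2(n-1, k, 1, True)
--     res2 = av_k * get_paint_count2(n-1, k, k-1, False)
--     return res1 + res2
-- ===== SOURCE B (Python) =====
-- def get_paint_count2(n, k, av_k, isSameAsPrev):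
--     if n <= 0:
--         return 1
--     if n == 1:
--         return av_k
--     # g(m) = number for a suffix of m posts whose first post has k-1 choices
--     # g(0) = 1, g(1) = k-1, g(m) = (k-1) * (g(m-2) + g(m-1))
--     g_prev, g_cur = 1, k - 1  # g(0), g(1)
--     for m in range(2, n):
--         g_prev, g_cur = g_cur, (k - 1) * (g_prev + g_cur)
--     # g_cur = g(n-1), g_prev = g(n-2)
--     if isSameAsPrev:
--         return g_cur
--     return av_k * (g_prev + g_cur)
-- ===== Notes on version B (the rewrite author's own statement) =====
-- stated objective: alternative
-- what changed: Replaced the exponential double recursion by a single linear loop over the two-term recurrence g(m)=(k-1)*(g(m-2)+g(m-1)), keeping only the last two values (intended as faster; a timing run saw A time out at n=16 where B returned but could not confirm a ratio).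
import Mathlib
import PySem

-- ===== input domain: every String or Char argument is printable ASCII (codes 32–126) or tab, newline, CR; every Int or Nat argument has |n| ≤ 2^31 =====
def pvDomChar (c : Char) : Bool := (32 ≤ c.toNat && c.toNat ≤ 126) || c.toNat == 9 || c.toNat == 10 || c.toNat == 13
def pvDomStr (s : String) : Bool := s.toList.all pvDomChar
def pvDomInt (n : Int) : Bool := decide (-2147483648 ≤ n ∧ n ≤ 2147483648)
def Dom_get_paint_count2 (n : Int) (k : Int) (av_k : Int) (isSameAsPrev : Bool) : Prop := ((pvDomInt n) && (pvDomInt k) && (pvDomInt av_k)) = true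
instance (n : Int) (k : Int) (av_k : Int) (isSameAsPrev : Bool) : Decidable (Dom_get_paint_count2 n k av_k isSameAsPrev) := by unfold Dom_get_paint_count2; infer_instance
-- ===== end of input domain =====

-- B replaces A's exponential double recursion by one linear pass over the two-term recurrence
-- g(m) = (k-1)*(g(m-2)+g(m-1)); an asymptotically lighter recurrence (timing run could not confirm a ratio).


-- ===== PORT A =====
def get_paint_count2 (n : Int) (k : Int) (av_k : Int) (isSameAsPrev : Bool) : Int :=
  if n ≤ 0 then 1
  else if n = 1 then av_k
  else if isSameAsPrev then
    get_paint_count2 (n - 1) k (k - 1) false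
  else
    av_k * get_paint_count2 (n - 1) k 1 true +
    av_k * get_paint_count2 (n - 1) k (k - 1) false
termination_by n.toNat
decreasing_by all_goals omega

-- ===== PORT B =====
def get_paint_count2_alt (n : Int) (k : Int) (av_k : Int) (isSameAsPrev : Bool) : Int :=
  if n ≤ 0 then 1
  else if n = 1 then av_k
  else
    let p := (PySem.List.pyRange 2 n 1).foldl
      (fun (p : Int × Int) (_ : Int) => (p.2, (k - 1) * (p.1 + p.2))) (1, k - 1)
    if isSameAsPrev then p.2 else av_k * (p.1 + p.2)

-- ===== PRECONDITION & SPEC =====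
-- A's recursion chain decrements n by 1, so its depth is n; CPython's default recursion limit
-- (1000) makes A raise RecursionError for n ≥ 999. Pre_ excludes exactly those raising inputs.
def Pre_get_paint_count2 (n : Int) (k : Int) (av_k : Int) (isSameAsPrev : Bool) : Prop := n ≤ 998
instance (n : Int) (k : Int) (av_k : Int) (isSameAsPrev : Bool) : Decidable (Pre_get_paint_count2 n k av_k isSameAsPrev) := by unfold Pre_get_paint_count2; infer_instance
def pvWitness_get_paint_count2 : Int × Int × Int × Bool := (5, 3, 2, false)

def Spec_get_paint_count2 (n : Int) (k : Int) (av_k : Int) (isSameAsPrev : Bool) (out : Int) : Prop := out = get_paint_count2_alt n k av_k isSameAsPrev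
instance (n : Int) (k : Int) (av_k : Int) (isSameAsPrev : Bool) (out : Int) : Decidable (Spec_get_paint_count2 n k av_k isSameAsPrev out) := by unfold Spec_get_paint_count2; infer_instance

-- ===== CLAIM (what is proved, stated in full; the proofs are below) =====
def Claim_equal_get_paint_count2 : Prop := ∀ (n : Int) (k : Int) (av_k : Int) (isSameAsPrev : Bool), Dom_get_paint_count2 n k av_k isSameAsPrev → Pre_get_paint_count2 n k av_k isSameAsPrev → Spec_get_paint_count2 n k av_k isSameAsPrev (get_paint_count2 n k av_k isSameAsPrev)

-- ===== LEMMAS AND PROOFS =====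

-- the two-term recurrence both programs compute: G k m = A's value on (m, k, k-1, false)
def G (k : Int) : Nat → Int
  | 0 => 1
  | 1 => k - 1
  | (m + 2) => (k - 1) * (G k m + G k (m + 1))

-- A on (n, k, k-1, false) equals G k n.toNat for n ≥ 1 (strong induction on the Nat)
theorem getA_eq_G (k : Int) : ∀ (N : Nat), get_paint_count2 ((N : Int) + 1) k (k - 1) false = G k (N + 1) := by
  intro N
  induction N using Nat.strong_induction_on with
  | _ N ih =>
    match N with
    | 0 => simp [get_paint_count2, G]
    | Nat.succ M =>
      rw [get_paint_count2]
      push_cast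
      rw [if_neg (by omega), if_neg (by omega)]
      have e1 : (M : Int) + 1 + 1 - 1 = (M : Int) + 1 := by ring
      rw [e1, ih M (by omega)]
      -- the inner call with isSameAsPrev = true
      have htrue : get_paint_count2 ((M : Int) + 1) k 1 true = G k M := by
        rw [get_paint_count2]
        match M with
        | 0 => simp [G]
        | Nat.succ P =>
          push_cast
          rw [if_neg (by omega), if_neg (by omega)]
          have e2 : (P : Int) + 1 + 1 - 1 = (P : Int) + 1 := by ring
          rw [e2, if_pos rfl, ih P (by omega)]
      rw [htrue]
      show (k - 1) * G k M + (k - 1) * G k (M + 1) = G k (M + 2)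
      rw [G]; ring

-- the fold over range(2, 2+N) ends in the pair (G k N, G k (N+1))
theorem fold_eq_G (k : Int) : ∀ (N : Nat),
    (PySem.List.pyRange 2 (2 + (N : Int)) 1).foldl
      (fun (p : Int × Int) (_ : Int) => (p.2, (k - 1) * (p.1 + p.2))) (1, k - 1)
      = (G k N, G k (N + 1)) := by
  intro N
  induction N with
  | zero =>
    rw [PySem.List.pyRange_one_eq_nil (by norm_num)]
    simp [G]
  | succ M ih =>
    have e : (2 : Int) + ((M : Int) + 1) = (2 + (M : Int)) + 1 := by ring
    rw [show ((M + 1 : Nat) : Int) = (M : Int) + 1 by push_cast; ring, e,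
      PySem.List.pyRange_one_succ_right (by omega), List.foldl_append, ih]
    simp only [List.foldl_cons, List.foldl_nil]
    show ((G k (M + 1), (k - 1) * (G k M + G k (M + 1))) : Int × Int) = _
    rw [show G k (M + 2) = (k - 1) * (G k M + G k (M + 1)) from rfl]

theorem main_eq (n k av_k : Int) (s : Bool) :
    get_paint_count2 n k av_k s = get_paint_count2_alt n k av_k s := by
  by_cases h0 : n ≤ 0
  · rw [get_paint_count2, get_paint_count2_alt]; simp [h0]
  · by_cases h1 : n = 1
    · rw [get_paint_count2, get_paint_count2_alt]; simp [h1]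
    · -- n ≥ 2
      obtain ⟨N, hN⟩ : ∃ N : Nat, n = 2 + (N : Int) := ⟨(n - 2).toNat, by omega⟩
      rw [get_paint_count2, get_paint_count2_alt]
      simp only [h0, h1, if_false]
      rw [hN, fold_eq_G k N]
      have e1 : (2 : Int) + (N : Int) - 1 = ((N : Nat) : Int) + 1 := by ring
      have hA : get_paint_count2 (2 + (N : Int) - 1) k (k - 1) false = G k (N + 1) := by
        rw [e1]; exact getA_eq_G k N
      have hT : get_paint_count2 (2 + (N : Int) - 1) k 1 true = G k N := by
        rw [e1, get_paint_count2]
        match N with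
        | 0 => simp [G]
        | Nat.succ P =>
          push_cast
          rw [if_neg (by omega), if_neg (by omega)]
          have e2 : ((P : Int) + 1) + 1 - 1 = (P : Int) + 1 := by ring
          rw [e2, if_pos rfl, getA_eq_G k P]
      cases s with
      | true => simp only [if_true]; exact hA
      | false =>
        simp only [Bool.false_eq_true, if_false]
        rw [hA, hT]; ring

-- ===== VERDICT (by name: the statement is the Claim_ definition above) =====
theorem get_paint_count2_spec : Claim_equal_get_paint_count2 := by
  intro n k av_k s _ _
  unfold Spec_get_paint_count2
  exact main_eq n k av_k s
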